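-- pv_equiv track=rewrite | github.com/Derefones/ranger | ranger/config.py | _parse_modules
-- ===== SOURCE A (Python) =====
-- from collections.abc import Iterable, Mapping, MutableMapping
--
-- ModuleName = str
--
-- DEFAULT_MODULE_ORDER: tuple[ModuleName, ...] = (
--     "subdomains",
--     "resolve",
--     "probe",
--     "ports",
--     "archive",
--     "dirb",
--     "api",
--     "params",
--     "cves",
--     "misconfig",
--     "takeover",
--     "secrets",
--     "summary",
-- )
--
-- def _parse_modules(raw: Iterable[str]) -> tuple[list[ModuleName], set[ModuleName]]:
--     modules = list(DEFAULT_MODULE_ORDER)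
--     disabled: set[ModuleName] = set()
--     for item in raw:
--         if not item:
--             continue
--         if item == "all":
--             modules = list(DEFAULT_MODULE_ORDER)
--             disabled.clear()
--             continue
--         if item.startswith("-"):
--             disabled.add(item[1:])
--         else:
--             if item not in modules:
--                 modules.append(item)
--     return modules, disabled
-- ===== SOURCE B (Python) =====
-- from collections.abc import Iterable
--
-- ModuleName = str
--
-- DEFAULT_MODULE_ORDER: tuple[ModuleName, ...] = (
--     "subdomains",
--     "resolve",
--     "probe",
--     "ports",
--     "archive",
--     "dirb",
--     "api",
--     "params",
--     "cves",
--     "misconfig",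
--     "takeover",
--     "secrets",
--     "summary",
-- )
--
-- def _parse_modules(raw: Iterable[str]) -> tuple[list[ModuleName], set[ModuleName]]:
--     # Every "all" resets the state, so only the suffix after the LAST "all" matters.
--     items = list(raw)
--     try:
--         cut = len(items) - items[::-1].index("all")
--     except ValueError:
--         cut = 0
--     tail = items[cut:]
--     minus = [it[1:] for it in tail if it.startswith("-")]
--     plus = [it for it in tail if it and not it.startswith("-")]
--     disabled = set(dict.fromkeys(minus))
--     modules = list(DEFAULT_MODULE_ORDER)
--     for it in plus:
--         if it not in modules:
--             modules.append(it)
--     return modules, disabled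
-- ===== Notes on version B (the rewrite author's own statement) =====
-- stated objective: alternative
-- what changed: A's per-item state machine that resets modules and clears disabled at every "all" is replaced by staged passes: find the cut point after the last "all" via index on the reversed list, slice off the suffix, build the disabled set from a dedup of the '-'-prefixed items and the modules list from the remaining items.
import Mathlib
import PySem

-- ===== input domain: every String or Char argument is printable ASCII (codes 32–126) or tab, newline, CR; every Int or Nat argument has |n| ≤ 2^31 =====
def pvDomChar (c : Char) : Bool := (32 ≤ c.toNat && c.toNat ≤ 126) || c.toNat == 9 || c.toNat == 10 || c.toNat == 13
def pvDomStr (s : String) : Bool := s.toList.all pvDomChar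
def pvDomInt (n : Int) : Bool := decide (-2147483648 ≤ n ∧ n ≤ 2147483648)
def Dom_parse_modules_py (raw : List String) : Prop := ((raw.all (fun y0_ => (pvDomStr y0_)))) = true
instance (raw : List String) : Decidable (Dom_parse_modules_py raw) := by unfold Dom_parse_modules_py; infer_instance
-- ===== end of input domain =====

-- B replaces A's per-item "all"-reset state machine by staged passes: locate the suffix
-- after the last "all" (index on the reversed list + slice), then build the disabled set
-- and the module list by separate filter/map/fold passes (objective: alternative).

-- ===== PORT A =====
def DEFAULT_MODULE_ORDER : List String :=
  ["subdomains", "resolve", "probe", "ports", "archive", "dirb", "api",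
   "params", "cves", "misconfig", "takeover", "secrets", "summary"]

-- one iteration of A's loop over (modules, disabled)
def pmStepA (st : List String × PySem.Set String) (item : String) :
    List String × PySem.Set String :=
  if item == "" then st
  else if item == "all" then (DEFAULT_MODULE_ORDER, PySem.Set.empty)
  else if PySem.Str.startswith item "-" then
    (st.1, PySem.Set.add st.2 (PySem.Str.slice item (some 1) none))
  else if st.1.contains item then st
  else (st.1 ++ [item], st.2)

def parse_modules_py (raw : List String) : List String × List String :=
  raw.foldl pmStepA (DEFAULT_MODULE_ORDER, PySem.Set.empty)

-- ===== PORT B =====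
def parse_modules_py_alt (raw : List String) : List String × List String :=
  -- cut = len(items) - items[::-1].index("all"), or 0 on ValueError
  let cut : Nat :=
    match PySem.List.index? raw.reverse "all" with
    | some i => raw.length - i
    | none => 0
  let tail := PySem.List.slice raw (some (cut : Int)) none
  let minus := (tail.filter (fun it => PySem.Str.startswith it "-")).map
      (fun it => PySem.Str.slice it (some 1) none)
  let plus := tail.filter (fun it => it != "" && !PySem.Str.startswith it "-")
  let disabled := PySem.Set.ofList minus
  let modules := plus.foldl
      (fun m it => if m.contains it then m else m ++ [it]) DEFAULT_MODULE_ORDER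
  (modules, disabled)

-- ===== PRECONDITION & SPEC =====
def Spec_parse_modules_py (raw : List String) (out : List String × List String) : Prop := out = parse_modules_py_alt raw
instance (raw : List String) (out : List String × List String) : Decidable (Spec_parse_modules_py raw out) := by unfold Spec_parse_modules_py; infer_instance

-- ===== CLAIM (what is proved, stated in full; the proofs are below) =====
def Claim_equal_parse_modules_py : Prop := ∀ (raw : List String), Dom_parse_modules_py raw → Spec_parse_modules_py raw (parse_modules_py raw)

-- ===== LEMMAS AND PROOFS =====

-- the prefix of l before the first "all" (= items after the last "all" when applied to raw.reverse)
def pmBeforeAll : List String → List String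
  | [] => []
  | x :: xs => if x == "all" then [] else x :: pmBeforeAll xs

theorem pmBeforeAll_append (a b : List String) :
    pmBeforeAll (a ++ b) =
      if "all" ∈ a then pmBeforeAll a else a ++ pmBeforeAll b := by
  induction a with
  | nil => simp
  | cons x xs ih =>
    by_cases hx : x = "all"
    · subst hx; simp [pmBeforeAll]
    · have hb : (x == "all") = false := by simp [hx]
      simp only [List.cons_append, pmBeforeAll, hb, Bool.false_eq_true, if_false, ih,
        List.mem_cons]
      by_cases hm : "all" ∈ xs
      · rw [if_pos hm, if_pos (Or.inr hm)]
      · rw [if_neg hm, if_neg (by rintro (h | h); exacts [hx h.symm, hm h])]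

theorem pmBeforeAll_id (a : List String) (h : "all" ∉ a) :
    pmBeforeAll a = a := by
  induction a with
  | nil => rfl
  | cons x xs ih =>
    simp at h
    have hx : ¬ x = "all" := fun hh => h.1 hh.symm
    simp [pmBeforeAll, hx, ih h.2]

theorem all_not_mem_pmBeforeAll (a : List String) : "all" ∉ pmBeforeAll a := by
  induction a with
  | nil => simp [pmBeforeAll]
  | cons x xs ih =>
    by_cases hx : x = "all"
    · subst hx; simp [pmBeforeAll]
    · simp only [pmBeforeAll, beq_iff_eq, hx, if_false, List.mem_cons]
      rintro (h | h); exacts [hx h.symm, ih h]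

-- A's fold over the whole list = A's fold over the suffix after the last "all"
theorem pm_lastAll (l : List String) (s : List String × PySem.Set String) :
    l.foldl pmStepA s =
      ((pmBeforeAll l.reverse).reverse).foldl pmStepA
        (if "all" ∈ l then (DEFAULT_MODULE_ORDER, PySem.Set.empty) else s) := by
  induction l generalizing s with
  | nil => simp [pmBeforeAll]
  | cons x xs ih =>
    rw [List.foldl_cons, ih (pmStepA s x), List.reverse_cons, pmBeforeAll_append]
    by_cases hx : x = "all"
    · subst hx
      have hst : pmStepA s "all" = (DEFAULT_MODULE_ORDER, PySem.Set.empty) := by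
        simp [pmStepA]
      rw [hst]
      by_cases hmem : "all" ∈ xs
      · simp [hmem]
      · have : ("all" : String) ∉ xs.reverse := by simpa using hmem
        simp [hmem, this, pmBeforeAll_id _ this, pmBeforeAll]
    · have hmem_iff : ("all" ∈ x :: xs) ↔ "all" ∈ xs := by
        simp [eq_comm]; intro h; exact absurd h hx
      by_cases hmem : "all" ∈ xs
      · have : ("all" : String) ∈ xs.reverse := by simpa using hmem
        simp [hmem, this, hmem_iff]
      · have hnr : ("all" : String) ∉ xs.reverse := by simpa using hmem
        simp [hmem, hnr, hmem_iff, pmBeforeAll_id _ hnr, pmBeforeAll, hx]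

-- on an "all"-free list, A's mixed fold splits into B's two staged passes
theorem pm_split (l : List String) (h : "all" ∉ l)
    (m : List String) (d : PySem.Set String) :
    l.foldl pmStepA (m, d) =
      ((l.filter (fun it => it != "" && !PySem.Str.startswith it "-")).foldl
          (fun m it => if m.contains it then m else m ++ [it]) m,
       PySem.Set.update d ((l.filter (fun it => PySem.Str.startswith it "-")).map
          (fun it => PySem.Str.slice it (some 1) none))) := by
  induction l generalizing m d with
  | nil => simp [PySem.Set.update]
  | cons x xs ih =>
    simp only [List.mem_cons, not_or] at h
    obtain ⟨hx, hxs⟩ := h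
    have hx' : x ≠ "all" := fun hh => hx hh.symm
    by_cases he : x = ""
    · subst he
      rw [List.foldl_cons, show pmStepA (m, d) "" = (m, d) from rfl, ih hxs]
      simp [show PySem.Chars.startswith ([] : List Char) ['-'] = false from by decide]
    · by_cases hs : PySem.Chars.startswith x.toList ['-'] = true
      · have st : pmStepA (m, d) x =
            (m, PySem.Set.add d (PySem.Str.slice x (some 1) none)) := by
          simp [pmStepA, he, hx', hs]
        rw [List.foldl_cons, st, ih hxs]
        simp [hs, PySem.Set.update]
      · have st : pmStepA (m, d) x =
            ((if m.contains x then m else m ++ [x]), d) := by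
          simp [pmStepA, he, hx', hs]
          split_ifs <;> rfl
        rw [List.foldl_cons, st, ih hxs]
        simp [he, hs]

-- B's cut/slice step computes exactly the suffix after the last "all"
theorem pm_tail_eq (raw : List String) :
    PySem.List.slice raw
        (some ((match PySem.List.index? raw.reverse "all" with
                | some i => raw.length - i
                | none => 0 : Nat) : Int)) none =
      (pmBeforeAll raw.reverse).reverse := by
  cases hidx : PySem.List.index? raw.reverse "all" with
  | none =>
    have hmem : ("all" : String) ∉ raw.reverse :=
      (PySem.List.index?_eq_none_iff _ _).mp hidx
    simp [pmBeforeAll_id _ hmem]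
  | some i =>
    obtain ⟨pre, suf, hsplit, hlen, hpre⟩ :=
      (PySem.List.index?_eq_some_iff _ _ _).mp hidx
    have hraw : raw = suf.reverse ++ "all" :: pre.reverse := by
      have := congrArg List.reverse hsplit
      simpa using this
    have hlen' : raw.length = suf.length + 1 + pre.length := by
      conv_lhs => rw [hraw]
      simp
      omega
    have hcut : raw.length - i = suf.length + 1 := by omega
    show PySem.List.slice raw (some ((raw.length - i : Nat) : Int)) none = _
    rw [PySem.List.slice_from_natCast, hcut, hsplit, pmBeforeAll_append, if_neg hpre]
    conv_lhs => rw [hraw]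
    have hdrop : (suf.reverse ++ "all" :: pre.reverse).drop (suf.length + 1)
        = pre.reverse := by
      rw [show suf.length + 1 = suf.reverse.length + 1 by simp, List.drop_append]
      simp
    rw [hdrop]
    simp [pmBeforeAll]

-- ===== VERDICT (by name: the statement is the Claim_ definition above) =====
theorem parse_modules_py_spec : Claim_equal_parse_modules_py := by
  intro raw _
  unfold Spec_parse_modules_py parse_modules_py parse_modules_py_alt
  rw [pm_lastAll]
  have hall : ("all" : String) ∉ pmBeforeAll raw.reverse := all_not_mem_pmBeforeAll _
  have hall' : ("all" : String) ∉ (pmBeforeAll raw.reverse).reverse := by simpa using hall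
  rw [pm_split _ hall']
  simp only [pm_tail_eq raw]
  split_ifs <;> rfl
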